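-- pv_equiv track=rewrite | github.com/dbscks97/Algorithm | 프로그래머스/lv1/42862. 체육복/체육복.py | solution
-- ===== SOURCE A (Python) =====
-- def solution(n, lost, reserve):
--     answer = 0
--     cnt=0
--     lost.sort()
--     reserve.sort()
--
--
--     lost_to_remove = []
--     reserve_to_remove = []
--
--     for i in lost:
--         if i in reserve:
--             lost_to_remove.append(i)
--             reserve_to_remove.append(i)
--
--     for i in lost_to_remove:
--         lost.remove(i)
--
--     for i in reserve_to_remove:
--         reserve.remove(i)
--
--     num = len(lost)
--
--     for i in range(len(lost)):
--         if lost[i]-1 in reserve: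
--             a = lost[i]
--             reserve.pop(reserve.index(a-1))
--             cnt+=1
--         elif lost[i]+1 in reserve:
--             a = lost[i]
--             reserve.pop(reserve.index(a+1))
--             cnt+=1
--
--     answer = n - num +cnt
--     return answer
-- ===== SOURCE B (Python) =====
-- def solution(n, lost, reserve):
--     # Count-based re-implementation: tally lost and reserve into dicts, cancel
--     # overlaps arithmetically, then one pass over the sorted distinct lost
--     # values lending whole batches (lower neighbour first). Unlike A it does
--     # not mutate (sort / remove from) its list arguments.
--     cl = {}
--     for v in lost:
--         cl[v] = cl.get(v, 0) + 1
--     cr = {}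
--     for v in reserve:
--         cr[v] = cr.get(v, 0) + 1
--     avail = dict(cr)
--     for v in cl:
--         if v in avail:
--             avail[v] -= cl[v]
--     num = 0
--     cnt = 0
--     for v in sorted(cl):
--         if cr.get(v, 0) > 0:
--             continue
--         m = cl[v]
--         num += m
--         t = min(m, avail.get(v - 1, 0))
--         if t > 0:
--             avail[v - 1] -= t
--             cnt += t
--         t2 = min(m - t, avail.get(v + 1, 0))
--         if t2 > 0:
--             avail[v + 1] -= t2
--             cnt += t2
--     return n - num + cnt
-- ===== Notes on version B (the rewrite author's own statement) =====
-- stated objective: faster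
-- what changed: Replaces A's sort-both-lists pipeline of membership scans, repeated list.remove and index/pop inner scans with count dictionaries: tally lost and reserve once, cancel overlaps arithmetically, then one pass over the sorted distinct lost values lending whole batches (lower neighbour first); B also leaves its list arguments unmutated while A sorts/removes in place.
import Mathlib
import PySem

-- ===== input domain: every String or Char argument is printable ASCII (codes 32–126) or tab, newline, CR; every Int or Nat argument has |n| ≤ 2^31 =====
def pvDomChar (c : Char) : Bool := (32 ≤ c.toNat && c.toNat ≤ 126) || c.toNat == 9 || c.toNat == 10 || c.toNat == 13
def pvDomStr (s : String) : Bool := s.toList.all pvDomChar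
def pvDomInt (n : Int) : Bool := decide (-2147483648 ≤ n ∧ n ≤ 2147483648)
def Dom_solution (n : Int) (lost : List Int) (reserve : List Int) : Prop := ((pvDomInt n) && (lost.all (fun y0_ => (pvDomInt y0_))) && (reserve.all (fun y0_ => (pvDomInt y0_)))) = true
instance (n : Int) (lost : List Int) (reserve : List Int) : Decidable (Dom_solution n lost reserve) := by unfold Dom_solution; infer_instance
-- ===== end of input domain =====

-- B re-implements the greedy with count dictionaries and one sorted pass over the
-- distinct lost values (batch lending, lower neighbour first) instead of A's
-- sorted-list membership/remove/index scans; equality is about the return value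
-- (A additionally sorts and mutates its list arguments in place, B does not).

-- ===== PORT A =====
-- loop body of A's final greedy loop
def solAStep (st : List Int × Int) (x : Int) : List Int × Int :=
  if st.1.contains (x - 1) then
    (((PySem.List.pop? st.1 (((PySem.List.index? st.1 (x - 1)).getD 0 : Nat) : Int)).map Prod.snd).getD st.1, st.2 + 1)
  else if st.1.contains (x + 1) then
    (((PySem.List.pop? st.1 (((PySem.List.index? st.1 (x + 1)).getD 0 : Nat) : Int)).map Prod.snd).getD st.1, st.2 + 1)
  else st

def solution (n : Int) (lost : List Int) (reserve : List Int) : Int :=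
  let lost1 := PySem.List.sorted lost (fun x => x) false
  let res1 := PySem.List.sorted reserve (fun x => x) false
  let tr := lost1.foldl (fun (p : List Int × List Int) i => if res1.contains i then (p.1 ++ [i], p.2 ++ [i]) else p) ([], [])
  let lost2 := tr.1.foldl (fun r i => (PySem.List.remove? r i).getD r) lost1
  let res2 := tr.2.foldl (fun r i => (PySem.List.remove? r i).getD r) res1
  let num : Int := lost2.length
  let fin := (PySem.List.pyRange 0 (lost2.length : Int) 1).foldl (fun st i => solAStep st (PySem.List.pyGetD lost2 i 0)) (res2, 0)
  n - num + fin.2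

-- ===== PORT B =====
-- loop body of B's single sorted pass over distinct lost values
def solBStep (cl : PySem.Dict Int Int) (cr : PySem.Dict Int Int) (st : PySem.Dict Int Int × Int × Int) (v : Int) : PySem.Dict Int Int × Int × Int :=
  if 0 < PySem.Dict.getD cr v 0 then st
  else
    let m := PySem.Dict.getD cl v 0
    let num := st.2.1 + m
    let t := min m (PySem.Dict.getD st.1 (v - 1) 0)
    let d1 := if 0 < t then PySem.Dict.insert st.1 (v - 1) (PySem.Dict.getD st.1 (v - 1) 0 - t) else st.1
    let c1 := if 0 < t then st.2.2 + t else st.2.2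
    let t2 := min (m - t) (PySem.Dict.getD d1 (v + 1) 0)
    let d2 := if 0 < t2 then PySem.Dict.insert d1 (v + 1) (PySem.Dict.getD d1 (v + 1) 0 - t2) else d1
    let c2 := if 0 < t2 then c1 + t2 else c1
    (d2, num, c2)

def solution_alt (n : Int) (lost : List Int) (reserve : List Int) : Int :=
  let cl := lost.foldl (fun d v => PySem.Dict.insert d v (PySem.Dict.getD d v 0 + 1)) (PySem.Dict.empty : PySem.Dict Int Int)
  let cr := reserve.foldl (fun d v => PySem.Dict.insert d v (PySem.Dict.getD d v 0 + 1)) (PySem.Dict.empty : PySem.Dict Int Int)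
  let avail := (PySem.Dict.keys cl).foldl (fun d v => if PySem.Dict.contains d v then PySem.Dict.insert d v (PySem.Dict.getD d v 0 - PySem.Dict.getD cl v 0) else d) cr
  let fin := (PySem.List.sorted (PySem.Dict.keys cl) (fun x => x) false).foldl (solBStep cl cr) (avail, 0, 0)
  n - fin.2.1 + fin.2.2

-- ===== PRECONDITION & SPEC =====
-- Pre_ excludes exactly the inputs where A raises ValueError: some value occurs
-- more often in lost than in reserve while occurring in reserve at least once
-- (A's duplicate-cancellation loop then calls reserve.remove on a missing value).
def Pre_solution (n : Int) (lost : List Int) (reserve : List Int) : Prop :=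
  ∀ v ∈ lost, List.count v reserve = 0 ∨ List.count v lost ≤ List.count v reserve
instance (n : Int) (lost : List Int) (reserve : List Int) : Decidable (Pre_solution n lost reserve) := by unfold Pre_solution; infer_instance

def pvWitness_solution : Int × List Int × List Int := (5, [2, 4], [1, 3, 5])

def Spec_solution (n : Int) (lost : List Int) (reserve : List Int) (out : Int) : Prop := out = solution_alt n lost reserve
instance (n : Int) (lost : List Int) (reserve : List Int) (out : Int) : Decidable (Spec_solution n lost reserve out) := by unfold Spec_solution; infer_instance

-- ===== CLAIM (what is proved, stated in full; the proofs are below) =====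
def Claim_equal_solution : Prop := ∀ (n : Int) (lost : List Int) (reserve : List Int), Dom_solution n lost reserve → Pre_solution n lost reserve → Spec_solution n lost reserve (solution n lost reserve)

-- ===== LEMMAS AND PROOFS =====

theorem pv_contains_iff (l : List Int) (v : Int) : l.contains v = true ↔ v ∈ l := by
  simp

-- Phase 1: the pair-building fold is a filter (twice).
theorem pv_pairFold (l : List Int) (c : Int → Bool) (a b : List Int) :
    l.foldl (fun (p : List Int × List Int) i => if c i then (p.1 ++ [i], p.2 ++ [i]) else p) (a, b)
      = (a ++ l.filter c, b ++ l.filter c) := by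
  induction l generalizing a b with
  | nil => simp
  | cons x t ih =>
    by_cases hx : c x = true
    · simp [hx, ih]
    · simp at hx; simp [hx, ih]

-- Removing a list of values, none equal to the head, keeps the head.
theorem pv_foldRemove_cons (ws : List Int) (x : Int) (hx : ∀ w ∈ ws, w ≠ x) (r : List Int) :
    ws.foldl (fun r i => (PySem.List.remove? r i).getD r) (x :: r)
      = x :: ws.foldl (fun r i => (PySem.List.remove? r i).getD r) r := by
  induction ws generalizing r with
  | nil => rfl
  | cons w t ih =>
    have hwx : x ≠ w := fun h => hx w (by simp) h.symm
    simp only [List.foldl_cons]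
    rw [PySem.List.remove?_cons_of_ne r hwx]
    cases h : PySem.List.remove? r w with
    | none => simpa [h] using ih (fun u hu => hx u (by simp [hu])) r
    | some r' => simpa [h] using ih (fun u hu => hx u (by simp [hu])) r'

-- Phase 2 on lost: removing every filtered occurrence leaves the complement filter.
theorem pv_foldRemove_filter (l : List Int) (c : Int → Bool) :
    (l.filter c).foldl (fun r i => (PySem.List.remove? r i).getD r) l
      = l.filter (fun i => !c i) := by
  induction l with
  | nil => rfl
  | cons x t ih =>
    by_cases hx : c x = true
    · simp only [List.filter_cons, hx, if_pos, List.foldl_cons,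
        PySem.List.remove?_cons_self, Option.getD_some]
      simpa [hx] using ih
    · simp only [Bool.not_eq_true] at hx
      have hne : ∀ w ∈ t.filter c, w ≠ x := by
        intro w hw he; subst he
        have := List.of_mem_filter hw; simp [hx] at this
      simp only [List.filter_cons, hx, Bool.false_eq_true, if_neg, not_false_iff]
      rw [pv_foldRemove_cons _ _ hne]
      simp [hx, ih]

-- Phase 2 on reserve: count after removing a sub-multiset.
theorem pv_count_foldRemove (ws : List Int) (r : List Int)
    (h : ∀ v, ws.count v ≤ r.count v) (v : Int) :
    (ws.foldl (fun r i => (PySem.List.remove? r i).getD r) r).count v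
      = r.count v - ws.count v := by
  induction ws generalizing r with
  | nil => simp
  | cons w t ih =>
    have hw : w ∈ r := by
      have := h w; simp [List.count_cons] at this
      exact List.count_pos_iff.mp (by omega)
    simp only [List.foldl_cons]
    rw [PySem.List.remove?_eq_some_erase r w hw, Option.getD_some]
    have h' : ∀ u, t.count u ≤ (r.erase w).count u := by
      intro u
      have hu2 := h u
      rw [List.count_erase]
      simp only [List.count_cons] at hu2
      by_cases hu : u = w <;> simp [hu] at hu2 ⊢ <;> omega
    rw [ih (r.erase w) h', List.count_erase]
    have hv2 := h v
    simp only [List.count_cons] at hv2 ⊢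
    by_cases hv : v = w <;> simp [hv] at hv2 ⊢ <;> omega

theorem pv_filter_replicate (m : Nat) (v : Int) (c : Int → Bool) :
    (List.replicate m v).filter c = if c v then List.replicate m v else [] := by
  induction m with
  | zero => simp
  | succ k ih => by_cases h : c v = true <;> simp [List.replicate_succ, List.filter_cons, h, ih]

theorem pv_count_filter (l : List Int) (p : Int → Bool) (v : Int) :
    (l.filter p).count v = if p v then l.count v else 0 := by
  induction l with
  | nil => simp
  | cons x t ih =>
    by_cases hx : p x = true
    · rw [List.filter_cons_of_pos hx, List.count_cons, List.count_cons, ih]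
      by_cases hv : x = v
      · subst hv; simp [hx]
      · simp [hv]
    · rw [List.filter_cons_of_neg (by simp [hx]), List.count_cons, ih]
      by_cases hv : x = v
      · subst hv; simp [hx]
      · simp [hv]

theorem pv_flatMap_congr (V : List Int) (f g : Int → List Int) (h : ∀ v ∈ V, f v = g v) :
    V.flatMap f = V.flatMap g := by
  induction V with
  | nil => rfl
  | cons v t ih =>
    rw [List.flatMap_cons, List.flatMap_cons, h v (by simp), ih (fun u hu => h u (by simp [hu]))]

theorem pv_filter_flatMap (V : List Int) (f : Int → List Int) (p : Int → Bool) :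
    (V.flatMap f).filter p = V.flatMap (fun v => (f v).filter p) := by
  induction V with
  | nil => rfl
  | cons v t ih => rw [List.flatMap_cons, List.flatMap_cons, List.filter_append, ih]

theorem pv_count_flatMap_replicate (V : List Int) (hnd : V.Nodup) (f : Int → Nat) (a : Int) :
    (V.flatMap (fun v => List.replicate (f v) v)).count a = if a ∈ V then f a else 0 := by
  induction V with
  | nil => simp
  | cons v t ih =>
    rcases List.nodup_cons.mp hnd with ⟨hv, hnd'⟩
    rw [List.flatMap_cons, List.count_append, List.count_replicate, ih hnd']
    by_cases ha : a = v
    · subst ha; simp [hv]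
    · simp [ha, Ne.symm ha]

theorem pv_pairwise_replicate (m : Nat) (a : Int) : (List.replicate m a).Pairwise (· ≤ ·) := by
  induction m with
  | zero => simp
  | succ k ih =>
    rw [List.replicate_succ, List.pairwise_cons]
    exact ⟨fun b hb => le_of_eq (List.eq_of_mem_replicate hb).symm, ih⟩

theorem pv_pairwise_flatMap_replicate (V : List Int) (f : Int → Nat) (h : V.Pairwise (· < ·)) :
    (V.flatMap (fun v => List.replicate (f v) v)).Pairwise (· ≤ ·) := by
  induction V with
  | nil => simp
  | cons v t ih =>
    rcases List.pairwise_cons.mp h with ⟨hv, ht⟩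
    rw [List.flatMap_cons, List.pairwise_append]
    refine ⟨pv_pairwise_replicate _ _, ih ht, ?_⟩
    intro a ha b hb
    rcases List.mem_flatMap.mp hb with ⟨u, hu, hbu⟩
    rw [List.eq_of_mem_replicate ha, List.eq_of_mem_replicate hbu]
    exact le_of_lt (hv u hu)

-- A's pop(reserve.index(w)) is erase of the first occurrence.
theorem pv_popIdx (R : List Int) (w : Int) (h : w ∈ R) :
    ((PySem.List.pop? R (((PySem.List.index? R w).getD 0 : Nat) : Int)).map Prod.snd).getD R
      = R.erase w := by
  induction R with
  | nil => cases h
  | cons x t ih =>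
    by_cases hx : x = w
    · subst hx
      rw [PySem.List.index?_cons_self]
      simp [PySem.List.pop?_zero_cons]
    · have hw : w ∈ t := by
        rcases List.mem_cons.mp h with h1 | h1
        · exact absurd h1.symm hx
        · exact h1
      obtain ⟨j, hj⟩ := Option.isSome_iff_exists.mp ((PySem.List.index?_isSome_iff t w).mpr hw)
      have hjlt : j < t.length := by
        obtain ⟨pre, suf, hps, hlen, _⟩ := (PySem.List.index?_eq_some_iff t w j).mp hj
        subst hps; simp; omega
      have hjx : PySem.List.index? (x :: t) w = some (j + 1) := by
        rw [PySem.List.index?_cons_of_ne t hx, hj]; rfl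
      rw [hjx]
      have hlt2 : j + 1 < (x :: t).length := by simp; omega
      rw [show (((some (j + 1)).getD 0 : Nat) : Int) = ((j + 1 : Nat) : Int) by rfl]
      rw [PySem.List.pop?_natCast (x :: t) (j + 1) hlt2]
      have ihe : t.eraseIdx j = t.erase w := by
        have := ih hw
        rw [hj] at this
        rw [show (((some j).getD 0 : Nat) : Int) = ((j : Nat) : Int) by rfl] at this
        rw [PySem.List.pop?_natCast t j hjlt] at this
        simpa using this
      simp only [Option.map_some, Option.getD_some, List.eraseIdx_cons_succ]
      rw [ihe, List.erase_cons, if_neg (by simp [hx])]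

-- A's greedy step, in erase form.
theorem pv_astep_eq (st : List Int × Int) (x : Int) :
    solAStep st x =
      if (x - 1) ∈ st.1 then (st.1.erase (x - 1), st.2 + 1)
      else if (x + 1) ∈ st.1 then (st.1.erase (x + 1), st.2 + 1)
      else st := by
  rcases st with ⟨R, c⟩
  try dsimp only
  by_cases h1 : (x - 1) ∈ R
  · rw [solAStep, if_pos (by simpa using (pv_contains_iff R (x - 1)).mpr h1)]
    rw [if_pos h1]
    try dsimp only
    rw [pv_popIdx R (x - 1) h1]
  · have h1c : R.contains (x - 1) = false := by
      rw [← Bool.not_eq_true]; intro hc; exact h1 ((pv_contains_iff R (x - 1)).mp hc)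
    by_cases h2 : (x + 1) ∈ R
    · rw [solAStep]
      try dsimp only
      rw [h1c, if_neg (by simp), if_pos (by simpa using (pv_contains_iff R (x + 1)).mpr h2),
        if_neg h1, if_pos h2]
      try dsimp only
      rw [pv_popIdx R (x + 1) h2]
    · have h2c : R.contains (x + 1) = false := by
        rw [← Bool.not_eq_true]; intro hc; exact h2 ((pv_contains_iff R (x + 1)).mp hc)
      rw [solAStep]
      try dsimp only
      rw [h1c, h2c, if_neg (by simp), if_neg (by simp), if_neg h1, if_neg h2]

-- Batch lemma: A's greedy over m copies of v.
theorem pv_batch (m : Nat) (v : Int) : ∀ (R : List Int) (c : Int),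
    ∃ R', (List.replicate m v).foldl solAStep (R, c)
        = (R', c + ((min m (R.count (v - 1)) : Nat) : Int) + ((min (m - min m (R.count (v - 1))) (R.count (v + 1)) : Nat) : Int))
      ∧ ∀ w, R'.count w = R.count w
          - (if w = v - 1 then min m (R.count (v - 1))
             else if w = v + 1 then min (m - min m (R.count (v - 1))) (R.count (v + 1)) else 0) := by
  induction m with
  | zero =>
    intro R c
    refine ⟨R, by simp, ?_⟩
    intro w; split_ifs <;> simp
  | succ m ih =>
    intro R c
    rw [List.replicate_succ, List.foldl_cons, pv_astep_eq]
    try dsimp only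
    by_cases h1 : (v - 1) ∈ R
    · rw [if_pos h1]
      obtain ⟨R', hf, hcnt⟩ := ih (R.erase (v - 1)) (c + 1)
      have hk1 : 0 < R.count (v - 1) := List.count_pos_iff.mpr h1
      have he1 : (R.erase (v - 1)).count (v - 1) = R.count (v - 1) - 1 := by
        simp [List.count_erase]
      have he2 : ∀ u, u ≠ v - 1 → (R.erase (v - 1)).count u = R.count u := by
        intro u hu; rw [List.count_erase, if_neg (by simp [Ne.symm hu])]; omega
      refine ⟨R', ?_, ?_⟩
      · rw [hf, he1, he2 (v + 1) (by omega)]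
        congr 1
        omega
      · intro w
        have hw := hcnt w
        rw [he1, he2 (v + 1) (by omega)] at hw
        by_cases hw1 : w = v - 1
        · subst hw1
          rw [if_pos rfl] at hw ⊢
          rw [he1] at hw
          omega
        · by_cases hw2 : w = v + 1
          · subst hw2
            rw [if_neg (by omega), if_pos rfl] at hw ⊢
            rw [he2 _ (by omega)] at hw
            omega
          · rw [if_neg hw1, if_neg hw2] at hw ⊢
            rw [he2 _ hw1] at hw
            omega
    · rw [if_neg h1]
      have hk1 : R.count (v - 1) = 0 := List.count_eq_zero.mpr h1
      by_cases h2 : (v + 1) ∈ R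
      · rw [if_pos h2]
        obtain ⟨R', hf, hcnt⟩ := ih (R.erase (v + 1)) (c + 1)
        have hk2 : 0 < R.count (v + 1) := List.count_pos_iff.mpr h2
        have he1 : (R.erase (v + 1)).count (v + 1) = R.count (v + 1) - 1 := by
          simp [List.count_erase]
        have he2 : ∀ u, u ≠ v + 1 → (R.erase (v + 1)).count u = R.count u := by
          intro u hu; rw [List.count_erase, if_neg (by simp [Ne.symm hu])]; omega
        refine ⟨R', ?_, ?_⟩
        · rw [hf, he1, he2 (v - 1) (by omega)]
          congr 1
          omega
        · intro w
          have hw := hcnt w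
          by_cases hw1 : w = v - 1
          · subst hw1
            rw [if_pos rfl] at hw ⊢
            rw [he2 _ (by omega)] at hw
            omega
          · by_cases hw2 : w = v + 1
            · subst hw2
              rw [if_neg (by omega), if_pos rfl] at hw ⊢
              rw [he1, he2 _ (by omega)] at hw
              omega
            · rw [if_neg hw1, if_neg hw2] at hw ⊢
              rw [he2 _ hw2] at hw
              omega
      · rw [if_neg h2]
        have hk2 : R.count (v + 1) = 0 := List.count_eq_zero.mpr h2
        obtain ⟨R', hf, hcnt⟩ := ih R c
        refine ⟨R', ?_, ?_⟩
        · rw [hf]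
          congr 1
          omega
        · intro w
          have hw := hcnt w
          split_ifs at hw ⊢ <;> omega

-- B's step, characterised by dictionary lookups.
theorem pv_bstep_char (cl : PySem.Dict Int Int) (cr : PySem.Dict Int Int) (v : Int)
    (d : PySem.Dict Int Int) (num c : Int) (k1 k2 m : Nat)
    (hres : ¬ (0 : Int) < PySem.Dict.getD cr v 0)
    (hm : PySem.Dict.getD cl v 0 = (m : Int))
    (h1 : PySem.Dict.getD d (v - 1) 0 = (k1 : Int))
    (h2 : PySem.Dict.getD d (v + 1) 0 = (k2 : Int)) :
    ∃ d2, solBStep cl cr (d, num, c) v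
        = (d2, num + (m : Int), c + ((min m k1 : Nat) : Int) + ((min (m - min m k1) k2 : Nat) : Int))
      ∧ ∀ w, PySem.Dict.getD d2 w 0 = PySem.Dict.getD d w 0
          - (if w = v - 1 then ((min m k1 : Nat) : Int)
             else if w = v + 1 then ((min (m - min m k1) k2 : Nat) : Int) else 0) := by
  have hne : (v + 1) ≠ (v - 1) := by omega
  rw [solBStep, if_neg hres]
  try dsimp only
  rw [hm, h1]
  rw [show min (m : Int) (k1 : Int) = ((min m k1 : Nat) : Int) from (Nat.cast_min m k1).symm]
  have hd1get : (if 0 < ((min m k1 : Nat) : Int)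
        then PySem.Dict.insert d (v - 1) ((k1 : Int) - ((min m k1 : Nat) : Int))
        else d).getD (v + 1) 0 = (k2 : Int) := by
    split_ifs with h
    · rw [PySem.Dict.getD_insert, if_neg hne, h2]
    · exact h2
  rw [hd1get]
  rw [show (m : Int) - ((min m k1 : Nat) : Int) = ((m - min m k1 : Nat) : Int) from
    (Nat.cast_sub (Nat.min_le_left m k1)).symm]
  rw [show min ((m - min m k1 : Nat) : Int) (k2 : Int) = ((min (m - min m k1) k2 : Nat) : Int) from
    (Nat.cast_min _ _).symm]
  refine ⟨(if 0 < ((min (m - min m k1) k2 : Nat) : Int)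
      then (if 0 < ((min m k1 : Nat) : Int)
          then PySem.Dict.insert d (v - 1) ((k1 : Int) - ((min m k1 : Nat) : Int)) else d).insert (v + 1)
            ((k2 : Int) - ((min (m - min m k1) k2 : Nat) : Int))
      else (if 0 < ((min m k1 : Nat) : Int)
          then PySem.Dict.insert d (v - 1) ((k1 : Int) - ((min m k1 : Nat) : Int)) else d)), ?_, ?_⟩
  · refine Prod.ext rfl (Prod.ext rfl ?_)
    try dsimp only
    split_ifs <;> omega
  · intro w
    by_cases hp2 : (0 : Int) < ((min (m - min m k1) k2 : Nat) : Int)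
    · rw [if_pos hp2]
      by_cases hp1 : (0 : Int) < ((min m k1 : Nat) : Int)
      · rw [if_pos hp1, PySem.Dict.getD_insert, PySem.Dict.getD_insert]
        by_cases hw2 : w = v + 1
        · rw [if_pos hw2, if_neg (by omega), if_pos hw2, hw2, h2]
        · rw [if_neg hw2]
          by_cases hw1 : w = v - 1
          · rw [if_pos hw1, if_pos hw1, hw1, h1]
          · rw [if_neg hw1, if_neg hw1, if_neg hw2]
            omega
      · have h10 : ((min m k1 : Nat) : Int) = 0 := by omega
        rw [if_neg hp1, PySem.Dict.getD_insert]
        by_cases hw2 : w = v + 1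
        · rw [if_pos hw2, if_neg (by omega), if_pos hw2, hw2, h2]
        · rw [if_neg hw2, if_neg hw2]
          by_cases hw1 : w = v - 1
          · rw [if_pos hw1, h10]
            omega
          · rw [if_neg hw1]
            omega
    · have h20 : ((min (m - min m k1) k2 : Nat) : Int) = 0 := by omega
      rw [if_neg hp2]
      by_cases hp1 : (0 : Int) < ((min m k1 : Nat) : Int)
      · rw [if_pos hp1, PySem.Dict.getD_insert]
        by_cases hw1 : w = v - 1
        · rw [if_pos hw1, if_pos hw1, hw1, h1]
        · rw [if_neg hw1, if_neg hw1]
          by_cases hw2 : w = v + 1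
          · rw [if_pos hw2, h20]
            omega
          · rw [if_neg hw2]
            omega
      · have h10 : ((min m k1 : Nat) : Int) = 0 := by omega
        rw [if_neg hp1]
        split_ifs with hw1 hw2
        · rw [h10]; omega
        · rw [h20]; omega
        · omega

-- Main loop correspondence: A's greedy over the flattened multiset vs B's pass
-- over the distinct sorted values.
theorem pv_mainLoop (cl : PySem.Dict Int Int) (cr : PySem.Dict Int Int) (reserve : List Int) (f : Int → Nat)
    (hf : ∀ v, PySem.Dict.getD cl v 0 = ((f v : Nat) : Int))
    (hcr : ∀ v, PySem.Dict.getD cr v 0 = ((List.count v reserve : Nat) : Int))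
    (V : List Int) : ∀ (R : List Int) (d : PySem.Dict Int Int) (c num : Int),
    (∀ w, ((R.count w : Nat) : Int) = PySem.Dict.getD d w 0) →
    (((V.flatMap (fun v => if List.count v reserve = 0 then List.replicate (f v) v else [])).foldl solAStep (R, c)).2
        = (V.foldl (solBStep cl cr) (d, num, c)).2.2
     ∧ (V.foldl (solBStep cl cr) (d, num, c)).2.1
        = num + (((V.flatMap (fun v => if List.count v reserve = 0 then List.replicate (f v) v else [])).length : Nat) : Int)) := by
  induction V with
  | nil => intro R d c num _; simp
  | cons v V ih =>
    intro R d c num hinv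
    rw [List.flatMap_cons, List.foldl_append, List.foldl_cons]
    by_cases hres : List.count v reserve = 0
    · rw [if_pos hres]
      obtain ⟨d2, hs, hd2⟩ := pv_bstep_char cl cr v d num c (R.count (v - 1)) (R.count (v + 1)) (f v)
        (by rw [hcr v]; omega) (hf v) (hinv (v - 1)).symm (hinv (v + 1)).symm
      obtain ⟨R', hfold, hcnt⟩ := pv_batch (f v) v R c
      have hinv' : ∀ w, ((R'.count w : Nat) : Int) = PySem.Dict.getD d2 w 0 := by
        intro w
        rw [hd2 w, ← hinv w, hcnt w]
        by_cases hw1 : w = v - 1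
        · subst hw1
          rw [if_pos rfl, if_pos rfl]
          omega
        · by_cases hw2 : w = v + 1
          · subst hw2
            rw [if_neg (show ¬((v : Int) + 1 = v - 1) by omega),
                if_neg (show ¬((v : Int) + 1 = v - 1) by omega),
                if_pos (show (v : Int) + 1 = v + 1 from rfl),
                if_pos (show (v : Int) + 1 = v + 1 from rfl)]
            omega
          · rw [if_neg hw1, if_neg hw2, if_neg hw1, if_neg hw2]
            omega
      obtain ⟨ha, hb⟩ := ih R' d2
        (c + ((min (f v) (R.count (v - 1)) : Nat) : Int) + ((min (f v - min (f v) (R.count (v - 1))) (R.count (v + 1)) : Nat) : Int))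
        (num + ((f v : Nat) : Int)) hinv'
      constructor
      · rw [hfold, hs, ha]
      · rw [hs, hb, List.length_append, List.length_replicate]
        push_cast
        ring
    · rw [if_neg hres]
      have hstep : solBStep cl cr (d, num, c) v = (d, num, c) := by
        rw [solBStep, if_pos (by rw [hcr v]; omega)]
      rw [List.foldl_nil, hstep]
      obtain ⟨ha, hb⟩ := ih R d c num hinv
      exact ⟨ha, by rw [hb]; simp⟩

-- Subtraction loop over distinct keys, characterised pointwise.
theorem pv_foldSub (g : Int → Int) : ∀ (ks : List Int), ks.Nodup →
    ∀ (d : PySem.Dict Int Int) (w : Int),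
    PySem.Dict.getD (ks.foldl (fun d v => if PySem.Dict.contains d v then PySem.Dict.insert d v (PySem.Dict.getD d v 0 - g v) else d) d) w 0
      = if w ∈ ks ∧ PySem.Dict.contains d w = true then PySem.Dict.getD d w 0 - g w
        else PySem.Dict.getD d w 0 := by
  intro ks
  induction ks with
  | nil => intro _ d w; simp
  | cons v t ih =>
    intro hnd d w
    rcases List.nodup_cons.mp hnd with ⟨hv, hnd'⟩
    rw [List.foldl_cons]
    by_cases hdv : PySem.Dict.contains d v = true
    · rw [if_pos hdv, ih hnd']
      have hcont : (PySem.Dict.insert d v (PySem.Dict.getD d v 0 - g v)).contains w = d.contains w := by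
        rw [PySem.Dict.contains_insert]
        by_cases hu : w = v
        · subst hu; simp [hdv]
        · simp [hu]
      by_cases hwv : w = v
      · subst hwv
        rw [if_neg (by intro h; exact hv h.1)]
        rw [PySem.Dict.getD_insert, if_pos rfl, if_pos ⟨by simp, hdv⟩]
      · rw [hcont, PySem.Dict.getD_insert, if_neg hwv]
        by_cases hwt : w ∈ t
        · by_cases hcw : PySem.Dict.contains d w = true
          · rw [if_pos ⟨hwt, hcw⟩, if_pos ⟨by simp [hwt], hcw⟩]
          · rw [if_neg (fun h => hcw h.2), if_neg (fun h => hcw h.2)]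
        · rw [if_neg (fun h => hwt h.1), if_neg (fun h => by
            rcases List.mem_cons.mp h.1 with h1 | h1
            · exact hwv h1
            · exact hwt h1)]
    · rw [if_neg hdv, ih hnd']
      by_cases hwv : w = v
      · subst hwv
        rw [if_neg (by intro h; exact hv h.1), if_neg (by intro h; rw [h.2] at hdv; exact hdv rfl)]
      · by_cases hwt : w ∈ t
        · by_cases hcw : PySem.Dict.contains d w = true
          · rw [if_pos ⟨hwt, hcw⟩, if_pos ⟨by simp [hwt], hcw⟩]
          · rw [if_neg (fun h => hcw h.2), if_neg (fun h => hcw h.2)]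
        · rw [if_neg (fun h => hwt h.1), if_neg (fun h => by
            rcases List.mem_cons.mp h.1 with h1 | h1
            · exact hwv h1
            · exact hwt h1)]

-- The assembled equivalence.
theorem pv_sol_eq (n : Int) (lost reserve : List Int) (hpre : Pre_solution n lost reserve) :
    solution n lost reserve = solution_alt n lost reserve := by
  have hlp := PySem.List.sorted_perm lost (fun x => x) false
  have hrp := PySem.List.sorted_perm reserve (fun x => x) false
  unfold solution solution_alt
  simp only [pv_pairFold, List.nil_append, pv_foldRemove_filter,
    PySem.List.foldl_pyRange_zero_pyGetD', PySem.Dict.foldl_insert_getD_add_one_eq_counter,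
    PySem.Dict.keys_counter]
  set lost1 := PySem.List.sorted lost (fun x => x) false with hl1
  set res1 := PySem.List.sorted reserve (fun x => x) false with hr1
  have hclcnt : ∀ v : Int, List.count v lost1 = List.count v lost := fun v => hlp.count_eq v
  have hrescnt : ∀ v : Int, List.count v res1 = List.count v reserve := fun v => hrp.count_eq v
  have hmemres : ∀ v : Int, v ∈ res1 ↔ v ∈ reserve := fun v => hrp.mem_iff
  set V := PySem.List.sorted (PySem.Set.ofList lost) (fun x => x) false with hVdef
  have hVlt : V.Pairwise (· < ·) := PySem.List.sorted_ofList_pairwise_lt lost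
  have hVnd : V.Nodup := hVlt.imp (fun h => ne_of_lt h)
  have hVmem : ∀ v : Int, v ∈ V ↔ v ∈ lost := by
    intro v
    rw [hVdef, PySem.List.mem_sorted, PySem.Set.mem_ofList]
  have hlost1V : lost1 = V.flatMap (fun v => List.replicate (List.count v lost) v) := by
    rw [hl1]
    apply PySem.List.sorted_id_eq_of_perm_of_pairwise
    · rw [List.perm_iff_count]
      intro a
      rw [pv_count_flatMap_replicate V hVnd _ a]
      by_cases ha : a ∈ V
      · rw [if_pos ha]
      · rw [if_neg ha, List.count_eq_zero.mpr (fun hmem => ha ((hVmem a).mpr hmem))]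
    · exact pv_pairwise_flatMap_replicate V _ hVlt
  have hq : ∀ v : Int, ((!res1.contains v) = true) ↔ List.count v reserve = 0 := by
    intro v
    have hcont : res1.contains v = true ↔ v ∈ reserve := (pv_contains_iff res1 v).trans (hmemres v)
    constructor
    · intro h
      rw [List.count_eq_zero]
      intro hv
      rw [hcont.mpr hv] at h
      exact absurd h (by simp)
    · intro h
      rw [List.count_eq_zero] at h
      cases hb : res1.contains v
      · rfl
      · exact absurd (hcont.mp hb) h
  have hlost2 : lost1.filter (fun i => !res1.contains i)
      = V.flatMap (fun v => if List.count v reserve = 0 then List.replicate (List.count v lost) v else []) := by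
    rw [hlost1V, pv_filter_flatMap]
    apply pv_flatMap_congr
    intro v _
    rw [pv_filter_replicate]
    by_cases hc : List.count v reserve = 0
    · rw [if_pos ((hq v).mpr hc), if_pos hc]
    · rw [if_neg (fun h => hc ((hq v).mp h)), if_neg hc]
  set ws := lost1.filter (fun i => res1.contains i) with hws
  have hwsle : ∀ v : Int, ws.count v ≤ res1.count v := by
    intro v
    rw [hws, pv_count_filter]
    by_cases hc : res1.contains v = true
    · rw [if_pos hc]
      have hvres : v ∈ reserve := (hmemres v).mp ((pv_contains_iff res1 v).mp hc)
      by_cases hvl : v ∈ lost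
      · rcases hpre v hvl with h0 | hle
        · exact absurd (List.count_pos_iff.mpr hvres) (by omega)
        · rw [hclcnt, hrescnt]
          exact hle
      · rw [hclcnt, List.count_eq_zero.mpr hvl]
        omega
    · rw [if_neg hc]
      omega
  have havail := pv_foldSub (fun v => PySem.Dict.getD (PySem.Dict.counter lost) v 0)
    (PySem.Set.ofList lost) (PySem.Set.nodup_ofList lost) (PySem.Dict.counter reserve)
  have hinv0 : ∀ w : Int,
      (((List.foldl (fun r i => (PySem.List.remove? r i).getD r) res1 ws).count w : Nat) : Int)
        = PySem.Dict.getD (List.foldl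
            (fun d v => if PySem.Dict.contains d v
              then PySem.Dict.insert d v (PySem.Dict.getD d v 0 - PySem.Dict.getD (PySem.Dict.counter lost) v 0)
              else d)
            (PySem.Dict.counter reserve) (PySem.Set.ofList lost)) w 0 := by
    intro w
    rw [pv_count_foldRemove ws res1 hwsle w, havail w,
        PySem.Dict.getD_counter, PySem.Dict.getD_counter, PySem.Dict.contains_counter, hws]
    rw [pv_count_filter lost1 (fun i => res1.contains i) w]
    by_cases hwr : w ∈ reserve
    · have hcw : res1.contains w = true := (pv_contains_iff res1 w).mpr ((hmemres w).mpr hwr)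
      have hcw' : reserve.contains w = true := (pv_contains_iff reserve w).mpr hwr
      rw [if_pos hcw]
      by_cases hwl : w ∈ lost
      · rw [if_pos ⟨(PySem.Set.mem_ofList lost w).mpr hwl, hcw'⟩, hclcnt, hrescnt]
        have hle : List.count w lost ≤ List.count w reserve := by
          rcases hpre w hwl with h0 | hle
          · exact absurd (List.count_pos_iff.mpr hwr) (by omega)
          · exact hle
        omega
      · rw [if_neg (fun h => hwl ((PySem.Set.mem_ofList lost w).mp h.1)), hclcnt, hrescnt,
          List.count_eq_zero.mpr hwl]
        omega
    · have hcw : res1.contains w = false := by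
        cases hb : res1.contains w
        · rfl
        · exact absurd ((hmemres w).mp ((pv_contains_iff res1 w).mp hb)) hwr
      have hcw' : reserve.contains w = false := by
        cases hb : reserve.contains w
        · rfl
        · exact absurd ((pv_contains_iff reserve w).mp hb) hwr
      rw [if_neg (show ¬ res1.contains w = true from fun h => by rw [hcw] at h; exact absurd h (by simp))]
      rw [if_neg (show ¬ (w ∈ PySem.Set.ofList lost ∧ reserve.contains w = true) from
        fun h => by rw [hcw'] at h; exact absurd h.2 (by simp))]
      rw [hrescnt]
      omega
  obtain ⟨hA2, hB2⟩ := pv_mainLoop (PySem.Dict.counter lost) (PySem.Dict.counter reserve) reserve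
    (fun v => List.count v lost)
    (fun v => PySem.Dict.getD_counter lost v) (fun v => PySem.Dict.getD_counter reserve v) V
    (List.foldl (fun r i => (PySem.List.remove? r i).getD r) res1 ws)
    (List.foldl
      (fun d v => if PySem.Dict.contains d v
        then PySem.Dict.insert d v (PySem.Dict.getD d v 0 - PySem.Dict.getD (PySem.Dict.counter lost) v 0)
        else d)
      (PySem.Dict.counter reserve) (PySem.Set.ofList lost)) 0 0 hinv0
  rw [hlost2, hA2, hB2]
  omega

-- ===== VERDICT (by name: the statement is the Claim_ definition above) =====
theorem solution_spec : Claim_equal_solution := by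
  intro n lost reserve _ hpre
  exact pv_sol_eq n lost reserve hpre
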